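-- pv_equiv track=rewrite | github.com/manohar9600/Finance-Extraction | extraction/timeseries.py | inverse_table
-- ===== SOURCE A (Python) =====
-- def inverse_table(header, res_table):
--     new_header = [""]
--     new_table = []
--     for j in range(len(res_table[0])):
--         if j != 0:
--             row = [header[j]]
--         for i in range(len(res_table)):
--             if j == 0:
--                 new_header.append(res_table[i][j])
--                 continue
--             row.append(res_table[i][j])
--         if j != 0:
--             new_table.append(row)
--     return new_header, new_table
-- ===== SOURCE B (Python) =====
-- def inverse_table(header, res_table):
--     # Row-major single pass: seed each output row with its header label, then
--     # scan the input rows ONCE, growing the new header and all output rows in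
--     # parallel (A instead scans column-by-column, re-reading all rows per column).
--     m = len(res_table[0])
--     if m == 0:
--         return [""], []
--     new_header = [""]
--     cols = [[header[j]] for j in range(1, m)]
--     for row in res_table:
--         new_header.append(row[0])
--         for col, j in zip(cols, range(1, m)):
--             col.append(row[j])
--     return new_header, cols
-- ===== Notes on version B (the rewrite author's own statement) =====
-- stated objective: alternative
-- what changed: A transposes column-major (outer loop over columns, inner rescan of all rows per column, with a j==0 branch); B transposes row-major in a single scan: it seeds every output row with its header label and grows the new header and all output rows in parallel while visiting each input row once.
import Mathlib
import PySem

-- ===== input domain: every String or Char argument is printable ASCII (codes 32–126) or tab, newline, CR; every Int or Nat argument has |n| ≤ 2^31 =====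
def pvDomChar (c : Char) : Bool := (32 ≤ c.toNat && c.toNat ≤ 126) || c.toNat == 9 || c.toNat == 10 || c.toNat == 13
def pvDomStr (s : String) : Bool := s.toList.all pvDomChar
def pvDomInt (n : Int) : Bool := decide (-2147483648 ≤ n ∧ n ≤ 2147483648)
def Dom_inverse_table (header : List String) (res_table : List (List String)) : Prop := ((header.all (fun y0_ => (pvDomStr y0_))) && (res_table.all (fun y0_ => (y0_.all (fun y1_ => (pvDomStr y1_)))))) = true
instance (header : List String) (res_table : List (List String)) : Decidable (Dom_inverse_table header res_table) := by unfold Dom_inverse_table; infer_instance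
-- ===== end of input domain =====

-- B transposes row-major in ONE scan of res_table, growing all output rows in parallel,
-- instead of A's column-major outer loop with a j==0 branch; objective: alternative.


-- ===== PORT A =====
-- A's outer loop over j; the j == 0 iteration extends new_header, every other
-- iteration builds one row left-to-right and appends it to new_table.
def inverse_tableStep (header : List String) (res_table : List (List String))
    (st : List String × List (List String)) (j : Int) : List String × List (List String) :=
  if j ≠ 0 then
    let row := [PySem.List.pyGetD header j ""]
    let row := (PySem.List.pyRange 0 (res_table.length : Int) 1).foldl
      (fun r i => r ++ [PySem.List.pyGetD (PySem.List.pyGetD res_table i []) j ""]) row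
    (st.1, st.2 ++ [row])
  else
    let nh := (PySem.List.pyRange 0 (res_table.length : Int) 1).foldl
      (fun nh i => nh ++ [PySem.List.pyGetD (PySem.List.pyGetD res_table i []) j ""]) st.1
    (nh, st.2)

def inverse_table (header : List String) (res_table : List (List String)) : List String × List (List String) :=
  (PySem.List.pyRange 0 ((PySem.List.pyGetD res_table 0 []).length : Int) 1).foldl
    (inverse_tableStep header res_table) ([""], [])

-- ===== PORT B =====
-- Row-major single pass: cols starts as the seeded output rows [[header[j]]],
-- each input row appends its j-th entry to the j-th output row via zip.
def inverse_table_alt (header : List String) (res_table : List (List String)) : List String × List (List String) :=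
  let m := (PySem.List.pyGetD res_table 0 []).length
  if m = 0 then ([""], [])
  else
    let cols := (PySem.List.pyRange 1 (m : Int) 1).map (fun j => [PySem.List.pyGetD header j ""])
    res_table.foldl
      (fun (st : List String × List (List String)) row =>
        (st.1 ++ [PySem.List.pyGetD row 0 ""],
         List.zipWith (fun col j => col ++ [PySem.List.pyGetD row j ""]) st.2
           (PySem.List.pyRange 1 (m : Int) 1)))
      ([""], cols)

-- ===== PRECONDITION & SPEC =====
-- Exactly where Python A returns: res_table nonempty (res_table[0] is read), every row at
-- least as long as row 0 (res_table[i][j] for j < len(res_table[0])), and, when there are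
-- columns beyond 0, header long enough for header[j], j < len(res_table[0]).
def Pre_inverse_table (header : List String) (res_table : List (List String)) : Prop :=
  res_table ≠ [] ∧
  (∀ row ∈ res_table, (res_table.headD []).length ≤ row.length) ∧
  ((res_table.headD []).length ≤ 1 ∨ (res_table.headD []).length ≤ header.length)
instance (header : List String) (res_table : List (List String)) : Decidable (Pre_inverse_table header res_table) := by unfold Pre_inverse_table; infer_instance

def pvWitness_inverse_table : List String × List (List String) :=
  (["h", "a", "b"], [["x", "1", "2"], ["y", "3", "4"]])

def Spec_inverse_table (header : List String) (res_table : List (List String)) (out : List String × List (List String)) : Prop := out = inverse_table_alt header res_table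
instance (header : List String) (res_table : List (List String)) (out : List String × List (List String)) : Decidable (Spec_inverse_table header res_table out) := by unfold Spec_inverse_table; infer_instance

-- ===== CLAIM (what is proved, stated in full; the proofs are below) =====
def Claim_equal_inverse_table : Prop := ∀ (header : List String) (res_table : List (List String)), Dom_inverse_table header res_table → Pre_inverse_table header res_table → Spec_inverse_table header res_table (inverse_table header res_table)

-- ===== LEMMAS AND PROOFS =====

-- inner loop of A: fold over range(len(res_table)) of appended gets = init ++ map over rows
theorem inner_fold_eq (res_table : List (List String)) (j : Int) (init : List String) :
    (PySem.List.pyRange 0 (res_table.length : Int) 1).foldl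
      (fun r i => r ++ [PySem.List.pyGetD (PySem.List.pyGetD res_table i []) j ""]) init
    = init ++ res_table.map (fun row => PySem.List.pyGetD row j "") := by
  rw [PySem.List.foldl_pyRange_zero_pyGetD' res_table []
        (fun r row => r ++ [PySem.List.pyGetD row j ""]) init]
  exact PySem.List.foldl_append_singleton_eq_map ..

-- fold of A's step over a list of nonzero j's only appends rows
theorem fold_ne_zero (header : List String) (res_table : List (List String))
    (L : List Int) (h : ∀ j ∈ L, j ≠ 0) (nh : List String) (nt : List (List String)) :
    L.foldl (inverse_tableStep header res_table) (nh, nt)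
    = (nh, nt ++ L.map (fun j => [PySem.List.pyGetD header j ""] ++ res_table.map (fun row => PySem.List.pyGetD row j ""))) := by
  induction L generalizing nt with
  | nil => simp
  | cons j L ih =>
    have hj : j ≠ 0 := h j (List.mem_cons_self ..)
    have hrest : ∀ x ∈ L, x ≠ 0 := fun x hx => h x (List.mem_cons_of_mem _ hx)
    simp only [List.foldl_cons, List.map_cons]
    rw [show inverse_tableStep header res_table (nh, nt) j
        = (nh, nt ++ [[PySem.List.pyGetD header j ""] ++ res_table.map (fun row => PySem.List.pyGetD row j "")]) by
      simp only [inverse_tableStep, if_pos hj, inner_fold_eq]]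
    rw [ih hrest]
    simp

-- zipWith of an append over (L.map g) and L collapses to a single map over L
theorem zipWith_map_self {α β : Type} (f : β → α → β) (g : α → β) (L : List α) :
    List.zipWith (fun col j => f col j) (L.map g) L = L.map (fun j => f (g j) j) := by
  induction L with
  | nil => rfl
  | cons j L ih => simp [ih]

-- B's single pass over the rows, stated with the tracked column seeds generalized
theorem fold_rows_eq (rows : List (List String)) (L : List Int) (h : List String)
    (g : Int → List String) :
    rows.foldl
      (fun (st : List String × List (List String)) row =>
        (st.1 ++ [PySem.List.pyGetD row 0 ""],
         List.zipWith (fun col j => col ++ [PySem.List.pyGetD row j ""]) st.2 L))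
      (h, L.map g)
    = (h ++ rows.map (fun row => PySem.List.pyGetD row 0 ""),
       L.map (fun j => g j ++ rows.map (fun row => PySem.List.pyGetD row j ""))) := by
  induction rows generalizing h g with
  | nil => simp
  | cons row rows ih =>
    simp only [List.foldl_cons]
    rw [zipWith_map_self (fun col j => col ++ [PySem.List.pyGetD row j ""]) g L]
    rw [ih (h ++ [PySem.List.pyGetD row 0 ""]) (fun j => g j ++ [PySem.List.pyGetD row j ""])]
    simp

-- ===== VERDICT (by name: the statement is the Claim_ definition above) =====
theorem inverse_table_spec : Claim_equal_inverse_table := by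
  intro header res_table _ _
  unfold Spec_inverse_table inverse_table inverse_table_alt
  generalize hrow0 : PySem.List.pyGetD res_table 0 [] = row0
  by_cases hm : row0.length = 0
  · simp [hm, PySem.List.pyRange]
  · have hpos : (0 : Int) < (row0.length : Int) := by exact_mod_cast Nat.pos_of_ne_zero hm
    simp only [hm]
    rw [PySem.List.pyRange_one_cons hpos]
    simp only [List.foldl_cons]
    rw [show inverse_tableStep header res_table ([""], []) 0
        = ([""] ++ res_table.map (fun row => PySem.List.pyGetD row 0 ""), []) by
      simp only [inverse_tableStep, inner_fold_eq]; simp]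
    rw [fold_ne_zero header res_table _ (fun j hj => by
          have := (PySem.List.mem_pyRange_one).mp hj; omega) _ _]
    rw [fold_rows_eq res_table (PySem.List.pyRange 1 (row0.length : Int) 1) [""]
          (fun j => [PySem.List.pyGetD header j ""])]
    simp
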